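-- pv_equiv track=rewrite | github.com/windellevega/stackleague | factorial_sum.py | factorial_sum
-- ===== SOURCE A (Python) =====
-- def factorial_sum(lst):
--     prime_list = []
--     final_list = []
--     for n in lst:
--         prime_list = list(set(prime_list).union(set(prime_factors(n))))
--     prime_list.sort()
--     for n in prime_list:
--         sum = 0
--         list_n = [n]
--         for m in lst:
--             if m % n == 0:
--                 sum = sum + m
--         list_n.append(sum)
--         final_list.append(list_n)
--     return final_list
--
-- def prime_factors(n):
--     i = 2
--     n = abs(n)
--     factors = []
--     while i * i <= n:
--         if n % i:
--             i += 1
--         else: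
--             n //= i
--             factors.append(i)
--     if n > 1:
--         factors.append(n)
--     return factors
-- ===== SOURCE B (Python) =====
-- def prime_factors(n):
--     i = 2
--     n = abs(n)
--     factors = []
--     while i * i <= n:
--         if n % i:
--             i += 1
--         else:
--             n //= i
--             factors.append(i)
--     if n > 1:
--         factors.append(n)
--     return factors
--
-- def factorial_sum(lst):
--     # one pass: factor each element once, accumulate it into the sum of each
--     # of its distinct prime factors; then emit [p, sum] for the sorted keys
--     sums = {}
--     for m in lst:
--         if m != 0:
--             for p in set(prime_factors(m)):
--                 sums[p] = sums.get(p, 0) + m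
--     return [[p, sums[p]] for p in sorted(sums)]
-- ===== Notes on version B (the rewrite author's own statement) =====
-- stated objective: faster
-- what changed: Instead of unioning prime-factor sets and then rescanning the whole list once per prime (O(P*L) divisibility passes), B makes one pass: it factors each element once and accumulates the element into a dict sum keyed by each of its distinct prime factors, then emits the sorted keys with their sums.
import Mathlib
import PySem

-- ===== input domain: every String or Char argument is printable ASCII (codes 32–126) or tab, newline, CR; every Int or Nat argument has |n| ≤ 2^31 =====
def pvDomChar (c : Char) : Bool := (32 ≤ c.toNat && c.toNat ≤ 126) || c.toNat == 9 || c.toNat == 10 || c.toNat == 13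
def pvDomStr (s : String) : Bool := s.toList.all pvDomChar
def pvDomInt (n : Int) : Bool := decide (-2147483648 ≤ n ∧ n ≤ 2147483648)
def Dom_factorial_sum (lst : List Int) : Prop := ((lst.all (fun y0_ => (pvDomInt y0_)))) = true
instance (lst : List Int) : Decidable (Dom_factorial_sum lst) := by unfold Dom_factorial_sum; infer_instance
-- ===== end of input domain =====

-- B replaces A's per-prime rescans of the whole list by one pass that factors each element
-- once and accumulates it into a dict keyed by its distinct prime factors (sorted keys at the end).

-- ===== PORT A =====
-- shared helper 'prime_factors' (identical in Source A and Source B): trial division;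
-- the loop variable is i = j + 2 so that i ≥ 2 is structural.
def pfLoop (j n : Nat) (acc : List Int) : List Int :=
  if (j + 2) * (j + 2) ≤ n then
    if n % (j + 2) ≠ 0 then
      pfLoop (j + 1) n acc
    else
      pfLoop j (n / (j + 2)) (acc ++ [((j + 2 : Nat) : Int)])
  else
    if 1 < n then acc ++ [(n : Int)] else acc
termination_by (n, n - j)
decreasing_by
  · have hle : j + 2 ≤ (j + 2) * (j + 2) := Nat.le_mul_of_pos_left _ (by omega)
    exact Prod.Lex.right n (by omega)
  · have hpos : 0 < (j + 2) * (j + 2) := by positivity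
    exact Prod.Lex.left _ _ (Nat.div_lt_self (by omega) (by omega))

def prime_factors (n : Int) : List Int := pfLoop 0 n.natAbs []

def factorial_sum (lst : List Int) : List (List Int) :=
  let prime_list : List Int :=
    lst.foldl (fun pl n =>
      PySem.Set.union (PySem.Set.ofList pl) (PySem.Set.ofList (prime_factors n))) []
  let prime_list := PySem.List.sorted prime_list (fun x => x) false
  prime_list.foldl (fun fl n =>
    fl ++ [[n] ++ [lst.foldl (fun s m => if PySem.Int.mod m n = 0 then s + m else s) 0]]) []

-- ===== PORT B =====
def factorial_sum_alt (lst : List Int) : List (List Int) :=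
  let sums : PySem.Dict Int Int :=
    lst.foldl (fun d m =>
      if m ≠ 0 then
        (PySem.Set.ofList (prime_factors m)).foldl (fun d p => d.insert p (d.getD p 0 + m)) d
      else d) PySem.Dict.empty
  (PySem.List.sorted sums.keys (fun x => x) false).map (fun p => [p, sums.getD p 0])

-- ===== PRECONDITION & SPEC =====
def Spec_factorial_sum (lst : List Int) (out : List (List Int)) : Prop := out = factorial_sum_alt lst
instance (lst : List Int) (out : List (List Int)) : Decidable (Spec_factorial_sum lst out) := by unfold Spec_factorial_sum; infer_instance

-- ===== CLAIM (what is proved, stated in full; the proofs are below) =====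
def Claim_equal_factorial_sum : Prop := ∀ (lst : List Int), Dom_factorial_sum lst → Spec_factorial_sum lst (factorial_sum lst)

-- ===== LEMMAS AND PROOFS =====

-- The trial-division loop computes Mathlib's prime factorisation.
theorem pfLoop_eq (j n : Nat) (acc : List Int) :
    (∀ m, 2 ≤ m → m < j + 2 → ¬ m ∣ n) →
    pfLoop j n acc = acc ++ (Nat.primeFactorsList n).map Int.ofNat := by
  induction j, n, acc using pfLoop.induct with
  | case1 j n acc h1 h2 ih =>
    intro hinv
    rw [pfLoop, if_pos h1, if_pos h2]
    refine ih ?_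
    intro m hm2 hmlt hdvd
    rcases Nat.lt_or_ge m (j + 2) with h | h
    · exact hinv m hm2 h hdvd
    · have hmeq : m = j + 2 := by omega
      subst hmeq
      obtain ⟨t, ht⟩ := hdvd
      exact h2 (by rw [ht]; exact Nat.mul_mod_right _ _)
  | case2 j n acc h1 h2 ih =>
    intro hinv
    have hmod : n % (j + 2) = 0 := by omega
    have hdvd : (j + 2) ∣ n := Nat.dvd_of_mod_eq_zero hmod
    have h4 : 4 ≤ n := le_trans (show (4:ℕ) ≤ (j + 2) * (j + 2) by nlinarith) h1
    have hne1 : n ≠ 1 := by omega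
    have hmf_le : Nat.minFac n ≤ j + 2 := Nat.minFac_le_of_dvd (by omega) hdvd
    have hmf_ge : ¬ Nat.minFac n < j + 2 := fun h =>
      hinv (Nat.minFac n) (Nat.minFac_prime hne1).two_le h (Nat.minFac_dvd n)
    have hmf : Nat.minFac n = j + 2 := by omega
    obtain ⟨k, rfl⟩ : ∃ k, n = k + 2 := ⟨n - 2, by omega⟩
    rw [pfLoop, if_pos h1, if_neg h2]
    rw [Nat.primeFactorsList_add_two, hmf]
    have hquot : (k + 2) / (j + 2) ∣ (k + 2) :=
      ⟨j + 2, (Nat.div_mul_cancel hdvd).symm⟩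
    rw [ih (fun m hm2 hmlt hd => hinv m hm2 hmlt (hd.trans hquot))]
    simp [List.append_assoc]
  | case3 j n acc h1 h2 =>
    intro hinv
    have hp : n.Prime := by
      rw [Nat.prime_def_lt']
      refine ⟨h2, ?_⟩
      intro m hm2 hmn hdvd
      rcases Nat.lt_or_ge m (j + 2) with h | h
      · exact hinv m hm2 h hdvd
      · obtain ⟨t, rfl⟩ := hdvd
        have ht2 : 2 ≤ t := by
          rcases t with _ | _ | t
          · simp at h2
          · simp at hmn
          · omega
        have hqd : t ∣ m * t := Dvd.intro m (Nat.mul_comm t m)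
        have hqlt : t < j + 2 := by
          by_contra hq2
          have hmm : (j + 2) * (j + 2) ≤ t * m := Nat.mul_le_mul (by omega) (by omega)
          rw [Nat.mul_comm t m] at hmm
          exact h1 hmm
        exact hinv t ht2 hqlt hqd
    rw [pfLoop, if_neg h1, if_pos h2, Nat.primeFactorsList_prime hp]
    simp
  | case4 j n acc h1 h2 =>
    intro hinv
    rw [pfLoop, if_neg h1, if_neg h2]
    have : n = 0 ∨ n = 1 := by omega
    rcases this with rfl | rfl
    · simp [Nat.primeFactorsList_zero]
    · simp [Nat.primeFactorsList_one]

theorem prime_factors_eq (n : Int) :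
    prime_factors n = (Nat.primeFactorsList n.natAbs).map Int.ofNat := by
  unfold prime_factors
  rw [pfLoop_eq 0 n.natAbs [] (fun m hm2 hmlt => by omega)]
  simp

theorem prime_factors_zero : prime_factors 0 = [] := by
  rw [prime_factors_eq]; simp

theorem prime_of_mem_prime_factors {p m : Int} (h : p ∈ prime_factors m) :
    ∃ q : Nat, q.Prime ∧ p = (q : Int) := by
  rw [prime_factors_eq, List.mem_map] at h
  obtain ⟨q, hq, rfl⟩ := h
  exact ⟨q, Nat.prime_of_mem_primeFactorsList hq, rfl⟩

theorem mem_prime_factors_iff_dvd {q : Nat} (hq : q.Prime) {m : Int} (hm : m ≠ 0) :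
    ((q : Int) ∈ prime_factors m) ↔ (q : Int) ∣ m := by
  rw [prime_factors_eq, Int.natCast_dvd, List.mem_map]
  constructor
  · rintro ⟨r, hr, heq⟩
    have hrq : r = q := by
      rw [Int.ofNat_eq_natCast] at heq
      exact_mod_cast heq
    subst hrq
    exact Nat.dvd_of_mem_primeFactorsList hr
  · intro h
    exact ⟨q, (Nat.mem_primeFactorsList (Int.natAbs_ne_zero.2 hm)).2 ⟨hq, h⟩, rfl⟩

-- A's running sum loop, as a map-sum.
theorem foldl_if_add (l : List Int) (P : Int → Prop) [DecidablePred P] (a : Int) :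
    l.foldl (fun s m => if P m then s + m else s) a
      = a + (l.map (fun m => if P m then m else 0)).sum := by
  induction l generalizing a with
  | nil => simp
  | cons x l ih =>
    simp only [List.foldl_cons, List.map_cons, List.sum_cons, ih]
    split_ifs <;> ring

-- A's prime_list accumulation: membership and nodup.
theorem A_keys_mem (lst : List Int) (pl0 : List Int) (p : Int) :
    p ∈ lst.foldl (fun pl n =>
        PySem.Set.union (PySem.Set.ofList pl) (PySem.Set.ofList (prime_factors n))) pl0
      ↔ p ∈ pl0 ∨ ∃ n ∈ lst, p ∈ prime_factors n := by
  induction lst generalizing pl0 with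
  | nil => simp
  | cons x l ih =>
    simp only [List.foldl_cons, ih, PySem.Set.mem_union, PySem.Set.mem_ofList, List.mem_cons]
    constructor
    · rintro (⟨h | h⟩ | ⟨n, hn, hp⟩)
      · exact Or.inl h
      · exact Or.inr ⟨x, Or.inl rfl, h⟩
      · exact Or.inr ⟨n, Or.inr hn, hp⟩
    · rintro (h | ⟨n, (rfl | hn), hp⟩)
      · exact Or.inl (Or.inl h)
      · exact Or.inl (Or.inr hp)
      · exact Or.inr ⟨n, hn, hp⟩

theorem A_keys_nodup (lst : List Int) (pl0 : List Int) (h0 : pl0.Nodup) :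
    (lst.foldl (fun pl n =>
        PySem.Set.union (PySem.Set.ofList pl) (PySem.Set.ofList (prime_factors n))) pl0).Nodup := by
  induction lst generalizing pl0 with
  | nil => exact h0
  | cons x l ih =>
    exact ih _ (PySem.Set.nodup_union _ _ (PySem.Set.nodup_ofList _))

-- B's inner loop over the (nodup) distinct prime factors of one element.
theorem B_inner_getD (m : Int) (ps : List Int) (hnd : ps.Nodup) (d : PySem.Dict Int Int) (q : Int) :
    (ps.foldl (fun d p => d.insert p (d.getD p 0 + m)) d).getD q 0
      = d.getD q 0 + (if q ∈ ps then m else 0) := by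
  induction ps generalizing d with
  | nil => simp
  | cons p ps ih =>
    have hnd' : ps.Nodup := hnd.of_cons
    have hpnot : p ∉ ps := (List.nodup_cons.1 hnd).1
    simp only [List.foldl_cons]
    rw [ih hnd']
    rw [PySem.Dict.getD_insert]
    by_cases hqp : q = p
    · subst hqp
      simp [hpnot]
    · simp [hqp, List.mem_cons]

-- B's dict after the whole pass: value at any key.
theorem B_getD (lst : List Int) (d : PySem.Dict Int Int) (q : Int) :
    (lst.foldl (fun d m =>
        if m ≠ 0 then
          (PySem.Set.ofList (prime_factors m)).foldl (fun d p => d.insert p (d.getD p 0 + m)) d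
        else d) d).getD q 0
      = d.getD q 0
        + (lst.map (fun m => if m ≠ 0 ∧ q ∈ prime_factors m then m else 0)).sum := by
  induction lst generalizing d with
  | nil => simp
  | cons x l ih =>
    simp only [List.foldl_cons, List.map_cons, List.sum_cons]
    by_cases hx : x = 0
    · subst hx
      rw [if_neg (by simp), ih, if_neg (by simp)]
      ring
    · rw [if_pos hx, ih, B_inner_getD x _ (PySem.Set.nodup_ofList _)]
      simp only [PySem.Set.mem_ofList]
      by_cases hq : q ∈ prime_factors x
      · rw [if_pos hq, if_pos ⟨hx, hq⟩]
        ring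
      · rw [if_neg hq, if_neg (fun h => hq h.2)]
        ring

-- B's dict after the whole pass: key set.
theorem B_keys_mem (lst : List Int) (d : PySem.Dict Int Int) (q : Int) :
    q ∈ (lst.foldl (fun d m =>
        if m ≠ 0 then
          (PySem.Set.ofList (prime_factors m)).foldl (fun d p => d.insert p (d.getD p 0 + m)) d
        else d) d).keys
      ↔ q ∈ d.keys ∨ ∃ m ∈ lst, m ≠ 0 ∧ q ∈ prime_factors m := by
  induction lst generalizing d with
  | nil => simp
  | cons x l ih =>
    simp only [List.foldl_cons]
    by_cases hx : x = 0
    · subst hx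
      rw [if_neg (by simp), ih]
      constructor
      · rintro (h | ⟨m, hm, h⟩)
        · exact Or.inl h
        · exact Or.inr ⟨m, List.mem_cons_of_mem _ hm, h⟩
      · rintro (h | ⟨m, hm, hm0, h⟩)
        · exact Or.inl h
        · rcases List.mem_cons.1 hm with rfl | hm
          · exact absurd rfl hm0
          · exact Or.inr ⟨m, hm, hm0, h⟩
    · rw [if_pos hx, ih, PySem.Dict.keys_foldl_insert]
      simp only [PySem.Set.mem_update, PySem.Set.mem_ofList, List.mem_cons]
      constructor
      · rintro (⟨h | h⟩ | ⟨m, hm, hm0, hp⟩)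
        · exact Or.inl h
        · exact Or.inr ⟨x, Or.inl rfl, hx, h⟩
        · exact Or.inr ⟨m, Or.inr hm, hm0, hp⟩
      · rintro (h | ⟨m, (rfl | hm), hm0, hp⟩)
        · exact Or.inl (Or.inl h)
        · exact Or.inl (Or.inr hp)
        · exact Or.inr ⟨m, hm, hm0, hp⟩

theorem B_keys_nodup (lst : List Int) (d : PySem.Dict Int Int) (h : d.keys.Nodup) :
    (lst.foldl (fun d m =>
        if m ≠ 0 then
          (PySem.Set.ofList (prime_factors m)).foldl (fun d p => d.insert p (d.getD p 0 + m)) d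
        else d) d).keys.Nodup := by
  induction lst generalizing d with
  | nil => exact h
  | cons x l ih =>
    simp only [List.foldl_cons]
    by_cases hx : x = 0
    · subst hx
      rw [if_neg (by simp)]
      exact ih d h
    · rw [if_pos hx]
      exact ih _ (PySem.Dict.nodup_keys_foldl_insert _ _ _ h)

-- ===== VERDICT (by name: the statement is the Claim_ definition above) =====
theorem factorial_sum_spec : Claim_equal_factorial_sum := by
  intro lst _
  unfold Spec_factorial_sum factorial_sum factorial_sum_alt
  simp only []
  -- name the two dictionaries / key lists
  set sums := lst.foldl (fun d m =>
      if m ≠ 0 then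
        (PySem.Set.ofList (prime_factors m)).foldl (fun d p => d.insert p (d.getD p 0 + m)) d
      else d) PySem.Dict.empty with hsums
  set KA := lst.foldl (fun pl n =>
      PySem.Set.union (PySem.Set.ofList pl) (PySem.Set.ofList (prime_factors n))) ([] : List Int) with hKA
  -- the two sorted key lists are equal
  have hmemeq : ∀ p, p ∈ KA ↔ p ∈ sums.keys := by
    intro p
    rw [hKA, A_keys_mem, hsums, B_keys_mem]
    simp only [PySem.Dict.keys_empty, List.not_mem_nil, false_or]
    constructor
    · rintro ⟨n, hn, hp⟩
      refine ⟨n, hn, ?_, hp⟩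
      rintro rfl
      rw [prime_factors_zero] at hp
      exact absurd hp (List.not_mem_nil)
    · rintro ⟨m, hm, _, hp⟩
      exact ⟨m, hm, hp⟩
  have hperm : KA.Perm sums.keys := by
    rw [List.perm_ext_iff_of_nodup (A_keys_nodup lst [] (by simp))
      (B_keys_nodup lst PySem.Dict.empty (by simp))]
    exact hmemeq
  have hsorted : PySem.List.sorted KA (fun x => x) false
      = PySem.List.sorted sums.keys (fun x => x) false :=
    PySem.List.sorted_eq_sorted_of_perm _ _ _ (fun a b h => h) hperm
  rw [PySem.List.foldl_append_singleton_eq_map, hsorted, List.nil_append]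
  -- pointwise equality of the rows
  apply List.map_congr_left
  intro p hp
  have hpK : p ∈ sums.keys := (PySem.List.mem_sorted _ _ _ _).1 hp
  have hpex : ∃ m ∈ lst, m ≠ 0 ∧ p ∈ prime_factors m := by
    have := (B_keys_mem lst PySem.Dict.empty p).1 (by rw [← hsums]; exact hpK)
    simpa using this
  obtain ⟨m0, _, _, hpm0⟩ := hpex
  obtain ⟨q, hq, rfl⟩ := prime_of_mem_prime_factors hpm0
  -- the value columns agree
  have hval : lst.foldl (fun s m => if PySem.Int.mod m (q : Int) = 0 then s + m else s) 0
      = sums.getD (q : Int) 0 := by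
    rw [hsums, B_getD, PySem.Dict.getD_empty, zero_add,
      foldl_if_add lst (fun m => PySem.Int.mod m (q : Int) = 0) 0, zero_add]
    congr 1
    apply List.map_congr_left
    intro m _
    have hiff : (PySem.Int.mod m (q : Int) = 0) ↔ ((q : Int) ∣ m) :=
      PySem.Int.mod_eq_zero_iff_dvd m (q : Int)
    by_cases hm : m = 0
    · subst hm
      simp
    · by_cases hd : (q : Int) ∣ m
      · rw [if_pos (hiff.2 hd), if_pos ⟨hm, (mem_prime_factors_iff_dvd hq hm).2 hd⟩]
      · rw [if_neg (fun h => hd (hiff.1 h)),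
          if_neg (fun h => hd ((mem_prime_factors_iff_dvd hq hm).1 h.2))]
  rw [hval]
  rfl
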